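-- pv_equiv track=rewrite | github.com/morahan/TerminalVisuals | src/skyline.py | _collect_layers
-- ===== SOURCE A (Python) =====
-- def _collect_layers(grid: list[list[tuple[int, str, str] | None]]) -> dict[str, list[tuple[int, int, int, str]]]:
--     layers: dict[str, list[tuple[int, int, int, str]]] = {}
--     for y, row in enumerate(grid):
--         for x, cell in enumerate(row):
--             if cell is None:
--                 continue
--             priority, char, kind = cell
--             layers.setdefault(kind, []).append((x, y, priority, char))
--     return layers
-- ===== SOURCE B (Python) =====
-- def _collect_layers(grid: list[list[tuple[int, str, str] | None]]) -> dict[str, list[tuple[int, int, int, str]]]: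
--     cells = [
--         (cell[2], (x, y, cell[0], cell[1]))
--         for y, row in enumerate(grid)
--         for x, cell in enumerate(row)
--         if cell is not None
--     ]
--     kinds = list(dict.fromkeys(k for k, _ in cells))
--     return {k: [v for kk, v in cells if kk == k] for k in kinds}
-- ===== Notes on version B (the rewrite author's own statement) =====
-- stated objective: alternative
-- what changed: Replaces the interleaved setdefault-accumulation into a dict with a materialize-then-group pipeline: flatten the grid into a (kind, value) cell list, dedup the kinds in first-occurrence order, and build each group by filtering the flat list.
import Mathlib
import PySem

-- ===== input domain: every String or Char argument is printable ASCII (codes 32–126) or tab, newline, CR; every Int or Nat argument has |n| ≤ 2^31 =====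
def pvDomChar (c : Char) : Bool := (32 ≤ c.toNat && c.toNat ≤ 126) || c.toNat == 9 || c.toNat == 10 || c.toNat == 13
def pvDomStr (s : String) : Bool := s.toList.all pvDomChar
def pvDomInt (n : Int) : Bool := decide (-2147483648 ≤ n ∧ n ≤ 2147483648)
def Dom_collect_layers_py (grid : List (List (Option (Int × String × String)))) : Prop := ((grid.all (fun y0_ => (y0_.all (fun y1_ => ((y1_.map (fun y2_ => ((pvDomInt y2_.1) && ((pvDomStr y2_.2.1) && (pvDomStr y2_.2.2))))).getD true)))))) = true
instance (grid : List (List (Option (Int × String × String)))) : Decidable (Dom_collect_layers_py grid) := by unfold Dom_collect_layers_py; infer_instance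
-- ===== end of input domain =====

-- B replaces A's interleaved setdefault-accumulation with a flatten / dedup-kinds / filter-per-kind pipeline (alternative decomposition, same results).

-- ===== PORT A =====
-- layers.setdefault(kind, []).append(v)  ≡  layers[kind] = layers.get(kind, []) + [v]  = Dict.modify kind [] (· ++ [v])
def collect_layers_py (grid : List (List (Option (Int × String × String)))) : List (String × List (Int × Int × Int × String)) :=
  ((PySem.List.enumerate grid 0).foldl (fun layers yr =>
    (PySem.List.enumerate yr.2 0).foldl (fun layers xc =>
      match xc.2 with
      | none => layers
      | some pck => layers.modify pck.2.2 [] (fun x => x ++ [(xc.1, yr.1, pck.1, pck.2.1)])) layers)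
    PySem.Dict.empty).items

-- ===== PORT B =====
-- the flat cell-list comprehension of Source B
def pvCellsB (grid : List (List (Option (Int × String × String)))) : List (String × (Int × Int × Int × String)) :=
  (PySem.List.enumerate grid 0).flatMap (fun yr =>
    (PySem.List.enumerate yr.2 0).filterMap (fun xc =>
      xc.2.map (fun pck => (pck.2.2, (xc.1, yr.1, pck.1, pck.2.1)))))

def collect_layers_py_alt (grid : List (List (Option (Int × String × String)))) : List (String × List (Int × Int × Int × String)) :=
  let cells := pvCellsB grid
  (PySem.List.dedup (cells.map (·.1))).map (fun k =>
    (k, (cells.filter (fun c => c.1 == k)).map (·.2)))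

-- ===== PRECONDITION & SPEC =====
def Spec_collect_layers_py (grid : List (List (Option (Int × String × String)))) (out : List (String × List (Int × Int × Int × String))) : Prop := out = collect_layers_py_alt grid
instance (grid : List (List (Option (Int × String × String)))) (out : List (String × List (Int × Int × Int × String))) : Decidable (Spec_collect_layers_py grid out) := by unfold Spec_collect_layers_py; infer_instance

-- ===== CLAIM (what is proved, stated in full; the proofs are below) =====
def Claim_equal_collect_layers_py : Prop := ∀ (grid : List (List (Option (Int × String × String)))), Dom_collect_layers_py grid → Spec_collect_layers_py grid (collect_layers_py grid)

-- ===== LEMMAS AND PROOFS =====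

-- A's inner loop over one row equals a fold of the grouping step over that row's flat cells
lemma pv_inner_eq (row : List (Option (Int × String × String))) :
    ∀ (s y : Int) (d : PySem.Dict String (List (Int × Int × Int × String))),
    (PySem.List.enumerate row s).foldl (fun layers xc =>
      match xc.2 with
      | none => layers
      | some pck => layers.modify pck.2.2 [] (fun x => x ++ [(xc.1, y, pck.1, pck.2.1)])) d
    = ((PySem.List.enumerate row s).filterMap (fun xc =>
        xc.2.map (fun pck => (pck.2.2, (xc.1, y, pck.1, pck.2.1))))).foldl
        (fun d p => d.modify p.1 [] (fun x => x ++ [p.2])) d := by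
  induction row with
  | nil => intro s y d; simp [PySem.List.enumerate]
  | cons c rest ih =>
    intro s y d
    rw [PySem.List.enumerate_cons]
    cases c with
    | none => simpa using ih (s+1) y d
    | some pck => simpa using ih (s+1) y _

-- A's whole nested loop equals a single fold of the grouping step over the flat cell list
lemma pv_fold_flatten (grid : List (List (Option (Int × String × String)))) :
    (PySem.List.enumerate grid 0).foldl (fun layers yr =>
      (PySem.List.enumerate yr.2 0).foldl (fun layers xc =>
        match xc.2 with
        | none => layers
        | some pck => layers.modify pck.2.2 [] (fun x => x ++ [(xc.1, yr.1, pck.1, pck.2.1)])) layers)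
      PySem.Dict.empty
    = (pvCellsB grid).foldl (fun d p => d.modify p.1 [] (fun x => x ++ [p.2])) PySem.Dict.empty := by
  unfold pvCellsB
  rw [List.foldl_flatMap]
  congr 1
  funext d yr
  exact pv_inner_eq yr.2 0 yr.1 d

-- ===== VERDICT (by name: the statement is the Claim_ definition above) =====
theorem collect_layers_py_spec : Claim_equal_collect_layers_py := by
  intro grid _
  unfold Spec_collect_layers_py collect_layers_py collect_layers_py_alt
  rw [pv_fold_flatten]
  set cells := pvCellsB grid with hc
  have hnd : ((cells.foldl (fun d p => d.modify p.1 [] (fun x => x ++ [p.2])) PySem.Dict.empty)).keys.Nodup :=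
    PySem.Dict.nodup_keys_foldl_modify_key cells (·.1) [] (fun _ p => (fun x => x ++ [p.2])) PySem.Dict.empty (by simp [PySem.Dict.empty, PySem.Dict.keys])
  rw [PySem.Dict.items_eq_map_keys _ hnd []]
  rw [PySem.Dict.keys_foldl_modify_key cells (·.1) [] (fun _ p => (fun x => x ++ [p.2])) PySem.Dict.empty]
  simp only [PySem.List.dedup_eq_ofList]
  have hkeys : PySem.Set.update (PySem.Dict.empty : PySem.Dict String (List (Int × Int × Int × String))).keys (cells.map (·.1)) = PySem.Set.ofList (cells.map (·.1)) := rfl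
  rw [hkeys]
  apply List.map_congr_left
  intro k _
  rw [PySem.Dict.getD_foldl_modify_append]
  simp [PySem.Dict.empty, PySem.Dict.getD, PySem.Dict.get?]
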